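-- pv_equiv track=rewrite | github.com/niklasbaumgardner/adventOfCode | 2024/19.py | check_design
-- ===== SOURCE A (Python) =====
-- def check_design(towels, pattern):
--     if len(pattern) == 0:
--         return True
--
--     for t in towels:
--         if pattern.startswith(t):
--             if check_design(towels, pattern[len(t) :]):
--                 return True
--     return False
-- ===== SOURCE B (Python) =====
-- def check_design(towels, pattern):
--     # Bottom-up DP over suffix positions; towels deduplicated into a hash set and
--     # probed by slice for each distinct towel length.
--     n = len(pattern)
--     tset = set(towels)
--     lengths = sorted({len(t) for t in tset if t})
--     dp = [False] * (n + 1)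
--     dp[n] = True
--     for i in range(n - 1, -1, -1):
--         dp[i] = any(dp[i + l] and pattern[i:i + l] in tset for l in lengths if i + l <= n)
--     return dp[0]
-- ===== Notes on version B (the rewrite author's own statement) =====
-- stated objective: faster
-- what changed: Replaced A's exponential backtracking recursion over the pattern suffix with a bottom-up DP over suffix positions probing a deduplicated towel hash set by slice for each distinct towel length.
-- outside the precondition, e.g. on check_design(['', 'a'], 'a'): A raises RecursionError, B returns True; on check_design(['a', ''], 'a'): A returns True, B returns True
import Mathlib
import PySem

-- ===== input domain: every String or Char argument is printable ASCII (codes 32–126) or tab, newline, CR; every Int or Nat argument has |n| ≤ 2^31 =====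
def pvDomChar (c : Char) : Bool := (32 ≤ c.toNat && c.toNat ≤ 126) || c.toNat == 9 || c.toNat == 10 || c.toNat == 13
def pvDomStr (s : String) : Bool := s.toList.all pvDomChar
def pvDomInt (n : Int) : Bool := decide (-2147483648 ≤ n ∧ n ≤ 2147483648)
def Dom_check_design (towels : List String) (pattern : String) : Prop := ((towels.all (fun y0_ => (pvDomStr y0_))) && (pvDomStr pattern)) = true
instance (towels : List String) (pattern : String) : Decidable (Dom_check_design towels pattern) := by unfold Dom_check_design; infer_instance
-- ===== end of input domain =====

-- B replaces A's exponential backtracking recursion with a bottom-up DP over suffix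
-- positions probing a deduplicated towel set by slice for each distinct towel length.


-- ===== PORT A =====
-- A's recursion on the pattern suffix; the fuel argument only makes it total in Lean:
-- under Pre_ (no empty towel) each recursive call strictly shortens the pattern, so
-- fuel = pattern.length + 1 is never exhausted (the fuel-0 value is never reached).
-- pattern[len(t):] with 0 ≤ len(t) is exactly List.drop; startswith on a whole string is List.isPrefixOf.
def checkDesignA (towels : List String) : Nat → List Char → Bool
  | 0, _ => false
  | fuel + 1, p =>
    if p.length = 0 then true
    else towels.any (fun t =>
      t.toList.isPrefixOf p && checkDesignA towels fuel (p.drop t.toList.length))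

def check_design (towels : List String) (pattern : String) : Bool :=
  checkDesignA towels (pattern.toList.length + 1) pattern.toList

-- ===== PORT B =====
-- sorted({len(t) for t in tset if t}): the sorted distinct towel lengths, empty towel skipped
def altLengths (tset : PySem.Set String) : List Nat :=
  PySem.List.sorted (PySem.Set.ofList ((tset.filter (fun t => !(t == ""))).map (fun t => t.toList.length))) (fun l => l) false

-- dp over suffix positions, built back to front: altGo tset lengths p is the dp table
-- for the suffix p (head = dp[i], j-th entry = dp[i+j]).  The slice pattern[i:i+l]
-- under the guard i+l ≤ n is exactly List.take l of the suffix; 'in tset' is contains.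
def altGo (tset : PySem.Set String) (lengths : List Nat) : List Char → List Bool
  | [] => [true]
  | c :: rest =>
    let dp := altGo tset lengths rest
    (lengths.any (fun l =>
      decide (l ≤ rest.length + 1) &&
        (dp.getD (l - 1) false && tset.contains (String.ofList ((c :: rest).take l))))) :: dp

def check_design_alt (towels : List String) (pattern : String) : Bool :=
  let tset : PySem.Set String := PySem.Set.ofList towels
  (altGo tset (altLengths tset) pattern.toList).headD false

-- ===== PRECONDITION & SPEC =====
-- Pre_ excludes towel lists containing the empty string (unless the pattern is empty):
-- on those A recurses on an unchanged pattern and dies with RecursionError whenever the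
-- empty towel is tried before a successful match is found (e.g. ["", "a"] with "a").
def Pre_check_design (towels : List String) (pattern : String) : Prop := pattern = "" ∨ "" ∉ towels
instance (towels : List String) (pattern : String) : Decidable (Pre_check_design towels pattern) := by unfold Pre_check_design; infer_instance
def pvWitness_check_design : List String × String := (["r", "g", "rb"], "rbgr")

def Spec_check_design (towels : List String) (pattern : String) (out : Bool) : Prop := out = check_design_alt towels pattern
instance (towels : List String) (pattern : String) (out : Bool) : Decidable (Spec_check_design towels pattern out) := by unfold Spec_check_design; infer_instance

-- ===== CLAIM (what is proved, stated in full; the proofs are below) =====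
def Claim_equal_check_design : Prop := ∀ (towels : List String) (pattern : String), Dom_check_design towels pattern → Pre_check_design towels pattern → Spec_check_design towels pattern (check_design towels pattern)

-- ===== LEMMAS AND PROOFS =====

theorem pv_any_congr_mem {α : Type} {l : List α} {f g : α → Bool}
    (h : ∀ x ∈ l, f x = g x) : l.any f = l.any g := by
  induction l with
  | nil => rfl
  | cons a l ih =>
    simp only [List.any_cons, h a (by simp), ih (fun x hx => h x (by simp [hx]))]

theorem altGo_getD (tset : PySem.Set String) (lengths : List Nat) :
    ∀ (p : List Char) (j : Nat), j ≤ p.length →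
      (altGo tset lengths p).getD j false = (altGo tset lengths (p.drop j)).headD false := by
  intro p
  induction p with
  | nil =>
    intro j hj
    have : j = 0 := by simpa using hj
    subst this
    simp [altGo]
  | cons c rest ih =>
    intro j hj
    cases j with
    | zero => simp [altGo]
    | succ j =>
      have := ih j (by simpa using hj)
      simpa [altGo] using this

theorem mem_altLengths (tset : PySem.Set String) (l : Nat) :
    l ∈ altLengths tset ↔ ∃ t ∈ tset, t ≠ "" ∧ t.toList.length = l := by
  unfold altLengths
  rw [PySem.List.mem_sorted, PySem.Set.mem_ofList]
  simp [List.mem_map, List.mem_filter, and_assoc]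

theorem checkA_eq_altGo (towels : List String) (h : ∀ t ∈ towels, t ≠ "") :
    ∀ (fuel : Nat) (p : List Char), p.length < fuel →
      checkDesignA towels fuel p =
        (altGo (PySem.Set.ofList towels) (altLengths (PySem.Set.ofList towels)) p).headD false := by
  intro fuel
  induction fuel with
  | zero => intro p hp; omega
  | succ fuel ih =>
    intro p hp
    cases p with
    | nil => simp [checkDesignA, altGo]
    | cons c rest =>
      have hp' : rest.length + 1 < fuel + 1 := by simpa using hp
      simp only [checkDesignA, altGo, List.length_cons, List.headD_cons]
      rw [if_neg (by omega : ¬ (rest.length + 1 = 0))]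
      -- rewrite A's recursive call, towel by towel, into a dp-table lookup
      have hstep : towels.any (fun t =>
          t.toList.isPrefixOf (c :: rest) && checkDesignA towels fuel ((c :: rest).drop t.toList.length)) =
          towels.any (fun t =>
          t.toList.isPrefixOf (c :: rest) &&
            (altGo (PySem.Set.ofList towels) (altLengths (PySem.Set.ofList towels)) rest).getD (t.toList.length - 1) false) := by
        apply pv_any_congr_mem
        intro t ht
        have htne : t.toList ≠ [] := fun hnil =>
          h t ht (String.toList_eq_nil_iff.mp hnil)
        have hlen : 1 ≤ t.toList.length := by
          cases hl : t.toList with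
          | nil => exact absurd hl htne
          | cons a l => simp
        by_cases hpre : t.toList.isPrefixOf (c :: rest)
        · have hle : t.toList.length ≤ rest.length + 1 := by
            have := (List.isPrefixOf_iff_prefix.mp hpre).length_le
            simpa using this
          rw [hpre]
          simp only [Bool.true_and]
          rw [altGo_getD _ _ rest (t.toList.length - 1) (by omega)]
          have hdrop : rest.drop (t.toList.length - 1) = (c :: rest).drop t.toList.length := by
            cases hl : t.toList with
            | nil => exact absurd hl htne
            | cons a l => simp
          rw [← hdrop]
          apply ih
          have hd : (rest.drop (t.toList.length - 1)).length = rest.length - (t.toList.length - 1) := by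
            simp
          omega
        · simp [hpre]
      rw [hstep]
      -- both sides are now an 'any' over the same dp table; exchange towels for lengths
      rw [Bool.eq_iff_iff]
      simp only [List.any_eq_true, Bool.and_eq_true, decide_eq_true_eq]
      constructor
      · rintro ⟨t, ht, hpre, hdp⟩
        have hprefix := List.isPrefixOf_iff_prefix.mp hpre
        have hle : t.toList.length ≤ rest.length + 1 := by
          have := hprefix.length_le; simpa using this
        refine ⟨t.toList.length, ?_, by omega, hdp, ?_⟩
        · exact (mem_altLengths _ _).mpr
            ⟨t, (PySem.Set.mem_ofList towels t).mpr ht, h t ht, rfl⟩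
        · have htake : (c :: rest).take t.toList.length = t.toList :=
            (List.prefix_iff_eq_take.mp hprefix).symm
          rw [htake, String.ofList_toList]
          exact List.contains_iff_mem.mpr ((PySem.Set.mem_ofList towels t).mpr ht)
      · rintro ⟨l, _, hle, hdp, hcont⟩
        set t := String.ofList ((c :: rest).take l) with hT
        have hmem : t ∈ towels :=
          (PySem.Set.mem_ofList towels t).mp (List.contains_iff_mem.mp hcont)
        have htl : t.toList = (c :: rest).take l := String.toList_ofList
        have hlen : t.toList.length = l := by
          rw [htl]
          exact List.length_take_of_le (by simpa using hle)
        refine ⟨t, hmem, ?_, by rw [hlen]; exact hdp⟩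
        apply List.isPrefixOf_iff_prefix.mpr
        rw [htl]
        exact List.take_prefix l (c :: rest)

-- ===== VERDICT (by name: the statement is the Claim_ definition above) =====
theorem check_design_spec : Claim_equal_check_design := by
  intro towels pattern _hdom hpre
  unfold Spec_check_design check_design check_design_alt
  rcases hpre with hpat | hne
  · subst hpat
    simp [checkDesignA, altGo, String.toList]
  · exact checkA_eq_altGo towels
      (fun t ht hte => hne (hte ▸ ht)) _ _ (Nat.lt_succ_self _)
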